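-- pv_equiv track=rewrite | github.com/oxfordfun/map-reduce | covid19/mapper.py | map_continent
-- ===== SOURCE A (Python) =====
-- def map_continent(data, continent):
--     '''
--     input:
--     continent  - name of continent
--
--     data - [{country-daily-record}*], e.g.
--     {
--         "dateRep": "12/04/2020",
--         "day": "12",
--         "month": "4",
--         "year": "2020",
--         "cases": "8719",
--         "deaths": "917",
--         "countriesAndTerritories": "United_Kingdom",
--         "geoId": "UK",
--         "countryterritoryCode": "GBR",
--         "popData2018": "66488991",
--         "continentExp": "Europe"
--     }
--
--     output:
--     country_combined - [{'{country}': [{country-daily-record}}*]]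
--     '''
--
--     ## fliter records for the continent [(country_daily _ecord), [county_daily_ecord]]
--     country_records = []
--
--     for record in data:
--         country = record['countriesAndTerritories']
--         if continent in ['Europe', 'Asia', 'America', 'Africa', 'Oceania']:
--             if record['continentExp'] == continent:
--                 country_records.append((country, record))
--         else:
--             country_records.append((country, record))
--
--
--     ## combine records for each country
--     country_combined = {}
--
--     for country, record in country_records:
--         if country not in country_combined.keys():
--             country_combined[country] = [record]
--         else:
--             country_combined[country].append(record)
--
--     return country_combined
-- ===== SOURCE B (Python) =====
-- def map_continent(data, continent):
--     # Different algorithm: select the kept records, dedup the country keys once,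
--     # then build each country's list by a per-country scan (nested comprehension),
--     # instead of incrementally grouping into a dict.
--     if continent in ('Europe', 'Asia', 'America', 'Africa', 'Oceania'):
--         kept = [r for r in data if r['continentExp'] == continent]
--     else:
--         kept = list(data)
--     countries = list(dict.fromkeys(r['countriesAndTerritories'] for r in kept))
--     return {c: [r for r in kept if r['countriesAndTerritories'] == c] for c in countries}
-- ===== Notes on version B (the rewrite author's own statement) =====
-- stated objective: alternative
-- what changed: Replaces A's incremental dict grouping (build (country,record) pairs, then grow per-country lists record by record) with a declarative three-stage computation: filter the kept records, dedup the country keys via dict.fromkeys, then materialize each country's list by a per-country scan in a dict comprehension (O(n*k) nested scans instead of O(n) grouping).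
import Mathlib
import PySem

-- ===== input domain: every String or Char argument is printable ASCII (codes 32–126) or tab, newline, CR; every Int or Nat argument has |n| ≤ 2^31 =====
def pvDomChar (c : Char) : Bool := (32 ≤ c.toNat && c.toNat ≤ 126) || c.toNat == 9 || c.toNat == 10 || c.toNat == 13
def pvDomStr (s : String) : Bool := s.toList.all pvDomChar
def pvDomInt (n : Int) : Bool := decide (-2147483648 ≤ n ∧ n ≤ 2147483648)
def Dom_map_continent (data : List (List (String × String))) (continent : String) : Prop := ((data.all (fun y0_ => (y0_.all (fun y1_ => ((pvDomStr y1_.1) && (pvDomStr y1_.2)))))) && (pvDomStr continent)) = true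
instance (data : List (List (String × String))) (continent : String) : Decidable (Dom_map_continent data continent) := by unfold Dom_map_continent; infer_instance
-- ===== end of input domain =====

-- B replaces A's incremental dict grouping with filter + dedup of country keys + a
-- per-country nested scan; return value only (A mutates nothing observable).

-- record['k'] under Pre_ (key present); first-match lookup like a Python dict built from pairs
def pvLookup (record : List (String × String)) (k : String) : String :=
  ((PySem.Dict.mk record).get? k).getD ""

def pvContinents : List String := ["Europe", "Asia", "America", "Africa", "Oceania"]

-- ===== PORT A =====
-- first loop of A: append (country, record) when kept
def pvStepA (continent : String) (acc : List (String × List (String × String)))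
    (record : List (String × String)) : List (String × List (String × String)) :=
  let country := pvLookup record "countriesAndTerritories"
  if pvContinents.contains continent then
    if pvLookup record "continentExp" == continent then acc ++ [(country, record)] else acc
  else
    acc ++ [(country, record)]

-- second loop of A: group one (country, record) pair into the dict
def pvCombine (cc : PySem.Dict String (List (List (String × String))))
    (cr : String × List (String × String)) : PySem.Dict String (List (List (String × String))) :=
  if cc.contains cr.1 = false then cc.insert cr.1 [cr.2]
  else cc.modify cr.1 [] (fun l => l ++ [cr.2])

def map_continent (data : List (List (String × String))) (continent : String) : List (String × List (List (String × String))) :=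
  let country_records := data.foldl (pvStepA continent) []
  (country_records.foldl pvCombine PySem.Dict.empty).items

-- ===== PORT B =====
def pvKey (record : List (String × String)) : String :=
  pvLookup record "countriesAndTerritories"

def map_continent_alt (data : List (List (String × String))) (continent : String) : List (String × List (List (String × String))) :=
  let kept := if pvContinents.contains continent
              then data.filter (fun r => pvLookup r "continentExp" == continent)
              else data
  let countries := PySem.List.dedup (kept.map pvKey)
  countries.map (fun c => (c, kept.filter (fun r => pvKey r == c)))

-- ===== PRECONDITION & SPEC =====
-- Pre_ excludes exactly the inputs where Python A raises KeyError: a record missing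
-- 'countriesAndTerritories' (always read), or, for a recognized continent, missing 'continentExp'.
def Pre_map_continent (data : List (List (String × String))) (continent : String) : Prop :=
  (∀ r ∈ data, (PySem.Dict.mk r).contains "countriesAndTerritories" = true) ∧
  (pvContinents.contains continent = true → ∀ r ∈ data, (PySem.Dict.mk r).contains "continentExp" = true)
instance (data : List (List (String × String))) (continent : String) : Decidable (Pre_map_continent data continent) := by unfold Pre_map_continent; infer_instance

def pvWitness_map_continent : (List (List (String × String))) × String :=
  ([[("countriesAndTerritories", "France"), ("continentExp", "Europe")],
    [("countriesAndTerritories", "China"), ("continentExp", "Asia")]], "Europe")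

def Spec_map_continent (data : List (List (String × String))) (continent : String) (out : List (String × List (List (String × String)))) : Prop := out = map_continent_alt data continent
instance (data : List (List (String × String))) (continent : String) (out : List (String × List (List (String × String)))) : Decidable (Spec_map_continent data continent out) := by unfold Spec_map_continent; infer_instance

-- ===== CLAIM =====
def Claim_equal_map_continent : Prop := ∀ (data : List (List (String × String))) (continent : String), Dom_map_continent data continent → Pre_map_continent data continent → Spec_map_continent data continent (map_continent data continent)

-- ===== LEMMAS AND PROOFS =====

-- A's first loop produces exactly the kept records, paired with their country key
lemma pv_records_eq (data : List (List (String × String))) (continent : String) :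
    data.foldl (pvStepA continent) []
      = (if pvContinents.contains continent
         then data.filter (fun r => pvLookup r "continentExp" == continent)
         else data).map (fun r => (pvKey r, r)) := by
  by_cases hc : pvContinents.contains continent = true
  · simp only [hc, if_true]
    rw [PySem.List.foldl_congr_mem' data (pvStepA continent)
        (fun acc r => if pvLookup r "continentExp" == continent
                      then acc ++ [(pvKey r, r)] else acc) []
        (fun r _ acc => by
          simp [pvStepA, pvKey, show continent ∈ pvContinents from by simpa using hc]),
      PySem.List.foldl_append_if]
    rfl
  · simp only [Bool.not_eq_true] at hc
    simp only [hc, Bool.false_eq_true, if_false]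
    rw [PySem.List.foldl_congr_mem' data (pvStepA continent)
        (fun acc r => acc ++ [(pvKey r, r)]) []
        (fun r _ acc => by
          simp [pvStepA, pvKey, show continent ∉ pvContinents from by simpa using hc]),
      PySem.List.foldl_append_singleton_eq_map]
    rfl

-- A's combine step is extensionally the canonical modify-append step
lemma pv_combine_eq_modify (cc : PySem.Dict String (List (List (String × String))))
    (cr : String × List (String × String)) :
    pvCombine cc cr = cc.modify cr.1 [] (fun l => l ++ [cr.2]) := by
  unfold pvCombine
  by_cases h : cc.contains cr.1 = true
  · simp [h]
  · simp only [Bool.not_eq_true] at h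
    simp [PySem.Dict.insert, PySem.Dict.modify, h, PySem.Dict.getD_of_not_contains]

-- grouping a keyed pair list: items = (dedup of keys).map (key, all matching values)
lemma pv_group_items (kept : List (List (String × String))) :
    ((kept.map (fun r => (pvKey r, r))).foldl pvCombine PySem.Dict.empty).items
      = (PySem.List.dedup (kept.map pvKey)).map
          (fun c => (c, kept.filter (fun r => pvKey r == c))) := by
  rw [PySem.List.foldl_congr_mem (kept.map (fun r => (pvKey r, r))) pvCombine
       (fun d p => d.modify p.1 [] (fun l => l ++ [p.2])) PySem.Dict.empty
       (fun acc x _ => pv_combine_eq_modify acc x)]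
  have hnd := PySem.Dict.nodup_keys_foldl_modify_key (kept.map (fun r => (pvKey r, r)))
      Prod.fst [] (fun _ p l => l ++ [p.2]) PySem.Dict.empty (by simp [PySem.Dict.keys_empty])
  rw [PySem.Dict.items_eq_map_keys _ hnd []]
  rw [PySem.Dict.keys_foldl_modify_key (kept.map (fun r => (pvKey r, r)))
      Prod.fst [] (fun _ p l => l ++ [p.2]) PySem.Dict.empty]
  simp only [PySem.Dict.keys_empty, PySem.Set.update_nil_left, List.map_map]
  apply List.map_congr_left
  intro c _
  rw [PySem.Dict.getD_foldl_modify_append]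
  simp [List.filter_map, List.map_map, Function.comp_def]

-- ===== VERDICT =====
theorem map_continent_spec : Claim_equal_map_continent := by
  intro data continent _ _
  show map_continent data continent = map_continent_alt data continent
  simp only [map_continent, map_continent_alt]
  rw [pv_records_eq, pv_group_items]
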